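-- pv_equiv track=rewrite | github.com/IllyaMoore/ukrainian-speech-translation-research | tools/placeholder_pipeline.py | check_entity_survival
-- ===== SOURCE A (Python) =====
-- from typing import Dict, List, Tuple
--
-- def check_entity_survival(translated: str,
--                             log: List[Tuple[str, str]]) -> int:
--     survived = 0
--     for _uk, en in log:
--         first_word = en.split()[0]
--         if first_word and first_word in translated:
--             survived += 1
--     return survived
-- ===== SOURCE B (Python) =====
-- from typing import Dict, List, Tuple
--
-- def check_entity_survival(translated: str,
--                             log: List[Tuple[str, str]]) -> int:
--     # Count each DISTINCT first word once: build a frequency table of first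
--     # words, then run the substring test once per distinct word.
--     counts = {}
--     for _uk, en in log:
--         w = en.split()[0]
--         counts[w] = counts.get(w, 0) + 1
--     return sum(c for w, c in counts.items() if w and w in translated)
-- ===== Notes on version B (the rewrite author's own statement) =====
-- stated objective: alternative
-- what changed: B builds a frequency table of distinct first words in one pass and performs the substring test once per distinct word, summing the counts, instead of testing every log entry against the translated text.
import Mathlib
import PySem

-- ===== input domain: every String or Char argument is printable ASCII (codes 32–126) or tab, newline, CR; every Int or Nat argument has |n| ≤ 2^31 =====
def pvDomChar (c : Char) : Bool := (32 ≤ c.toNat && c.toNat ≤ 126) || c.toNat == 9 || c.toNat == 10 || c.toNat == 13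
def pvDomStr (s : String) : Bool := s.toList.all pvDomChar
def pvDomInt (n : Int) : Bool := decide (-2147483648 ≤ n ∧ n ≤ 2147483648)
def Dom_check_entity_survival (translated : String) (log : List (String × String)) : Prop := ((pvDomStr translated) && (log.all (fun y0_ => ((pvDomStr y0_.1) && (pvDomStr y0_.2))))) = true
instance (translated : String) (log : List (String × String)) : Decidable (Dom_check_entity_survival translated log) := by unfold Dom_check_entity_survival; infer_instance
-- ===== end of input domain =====

-- B counts each distinct first word once via a frequency table (alternative decomposition, same results).

-- ===== PORT A =====
-- A: one pass over log, substring-testing each entry's first word against translated.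
-- en.split()[0] raises on a word-free string; Pre_ excludes that, headD "" is the (unreached) total stand-in.
def check_entity_survival (translated : String) (log : List (String × String)) : Int :=
  log.foldl (fun survived p =>
    let first_word := (PySem.Str.split₀ p.2).headD ""
    if first_word ≠ "" && PySem.Str.isIn first_word translated then survived + 1 else survived) 0

-- ===== PORT B =====
-- B: build the first-word frequency dict, then sum counts of the distinct words occurring in translated.
def check_entity_survival_alt (translated : String) (log : List (String × String)) : Int :=
  let counts : PySem.Dict String Int :=
    log.foldl (fun d p =>
      let w := (PySem.Str.split₀ p.2).headD ""
      d.insert w (d.getD w 0 + 1)) PySem.Dict.empty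
  ((counts.items.filter (fun kv => kv.1 ≠ "" && PySem.Str.isIn kv.1 translated)).map (·.2)).sum

-- ===== PRECONDITION & SPEC =====
-- Pre_ excludes exactly the inputs where A raises IndexError: a log entry whose English side splits to no words.
def Pre_check_entity_survival (translated : String) (log : List (String × String)) : Prop :=
  ∀ p ∈ log, PySem.Str.split₀ p.2 ≠ []
instance (translated : String) (log : List (String × String)) : Decidable (Pre_check_entity_survival translated log) := by unfold Pre_check_entity_survival; infer_instance
def pvWitness_check_entity_survival : String × (List (String × String)) :=
  ("hello world", [("pryvit", "hello there"), ("svit", "moon base")])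
def Spec_check_entity_survival (translated : String) (log : List (String × String)) (out : Int) : Prop := out = check_entity_survival_alt translated log
instance (translated : String) (log : List (String × String)) (out : Int) : Decidable (Spec_check_entity_survival translated log out) := by unfold Spec_check_entity_survival; infer_instance

-- ===== CLAIM (what is proved, stated in full; the proofs are below) =====
def Claim_equal_check_entity_survival : Prop := ∀ (translated : String) (log : List (String × String)), Dom_check_entity_survival translated log → Pre_check_entity_survival translated log → Spec_check_entity_survival translated log (check_entity_survival translated log)

-- ===== LEMMAS AND PROOFS =====

-- the first-word extractor both ports share
def pvFw (p : String × String) : String := (PySem.Str.split₀ p.2).headD ""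

lemma pvA_eq_countP (translated : String) (log : List (String × String)) :
    check_entity_survival translated log
      = ((log.map pvFw).countP (fun w => w ≠ "" && PySem.Str.isIn w translated) : Int) := by
  unfold check_entity_survival
  rw [List.countP_map]
  have hfun : (fun (survived : Int) (p : String × String) =>
      let first_word := (PySem.Str.split₀ p.2).headD ""
      if first_word ≠ "" && PySem.Str.isIn first_word translated then survived + 1
      else survived)
      = (fun survived p =>
          if ((fun w => w ≠ "" && PySem.Str.isIn w translated) ∘ pvFw) p = true then survived + 1
          else survived) := rfl
  rw [hfun, PySem.List.foldl_count_if, zero_add]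

lemma pvSum_indicator (p : String → Bool) (x : String) :
    ∀ (l : List String), l.Nodup → x ∈ l →
      (l.map (fun k => if p k ∧ k = x then (1 : Int) else 0)).sum = if p x then 1 else 0 := by
  intro l
  induction l with
  | nil => simp
  | cons a t ih =>
      intro hnd hmem
      by_cases hax : a = x
      · subst hax
        have hz : (t.map (fun k => if p k ∧ k = a then (1 : Int) else 0)).sum = 0 := by
          apply List.sum_eq_zero; intro y hy
          rcases List.mem_map.mp hy with ⟨k, hk, rfl⟩
          have hka : k ≠ a := fun h => (List.nodup_cons.mp hnd).1 (h ▸ hk)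
          simp [hka]
        simp [hz]
      · have hx : x ∈ t := by
          rcases List.mem_cons.mp hmem with h | h
          · exact absurd h.symm hax
          · exact h
        have ht := ih (List.nodup_cons.mp hnd).2 hx
        simp [hax, ht]

lemma pvSum_counts (p : String → Bool) (l : List String) (hl : l.Nodup) :
    ∀ (xs : List String), (∀ x ∈ xs, x ∈ l) →
      (l.map (fun k => if p k then (xs.count k : Int) else 0)).sum = (xs.countP p : Int) := by
  intro xs
  induction xs with
  | nil => intro _; simp
  | cons x t ih =>
      intro hsub
      have hx : x ∈ l := hsub x (List.mem_cons_self)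
      have ht : ∀ y ∈ t, y ∈ l := fun y hy => hsub y (List.mem_cons_of_mem _ hy)
      have hpt : ∀ k : String, (if p k then (((x :: t).count k : Nat) : Int) else 0)
          = (if p k then (t.count k : Int) else 0) + (if p k ∧ k = x then (1 : Int) else 0) := by
        intro k
        by_cases hkx : k = x
        · subst hkx
          by_cases hp : p k <;> simp [hp]
        · have hxk : ¬ (x = k) := fun h => hkx h.symm
          by_cases hp : p k <;> simp [hp, hkx, hxk]
      calc (l.map (fun k => if p k then (((x :: t).count k : Nat) : Int) else 0)).sum
          = (l.map (fun k => (if p k then (t.count k : Int) else 0)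
              + (if p k ∧ k = x then (1 : Int) else 0))).sum := by
            exact congrArg List.sum (List.map_congr_left (fun k _ => hpt k))
        _ = (l.map (fun k => if p k then (t.count k : Int) else 0)).sum
              + (l.map (fun k => if p k ∧ k = x then (1 : Int) else 0)).sum :=
            PySem.List.sum_map_add_int l _ _
        _ = ((t.countP p : Nat) : Int) + (if p x then 1 else 0) := by
            rw [ih ht, pvSum_indicator p x l hl hx]
        _ = (((x :: t).countP p : Nat) : Int) := by
            rw [List.countP_cons]
            by_cases hp : p x <;> simp [hp]

-- sum of the filtered value column = sum of the if-indicator over all keys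
lemma pvFilter_map_sum (p : String → Bool) (f : String → Int) :
    ∀ (l : List String),
      (((l.map (fun k => (k, f k))).filter (fun kv => p kv.1)).map (·.2)).sum
        = (l.map (fun k => if p k then f k else 0)).sum := by
  intro l
  induction l with
  | nil => simp
  | cons a t ih =>
      by_cases hp : p a <;> simp [hp, ih]

lemma pvB_eq_countP (translated : String) (log : List (String × String)) :
    check_entity_survival_alt translated log
      = ((log.map pvFw).countP (fun w => w ≠ "" && PySem.Str.isIn w translated) : Int) := by
  unfold check_entity_survival_alt
  have hfold : log.foldl (fun d p =>
      let w := (PySem.Str.split₀ p.2).headD ""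
      d.insert w (d.getD w 0 + 1)) PySem.Dict.empty
      = PySem.Dict.counter (log.map pvFw) := by
    have hfun2 : (fun (d : PySem.Dict String Int) (p : String × String) =>
        let w := (PySem.Str.split₀ p.2).headD ""
        d.insert w (d.getD w 0 + 1))
        = (fun d p => d.insert (pvFw p) (d.getD (pvFw p) 0 + 1)) := rfl
    rw [hfun2, ← PySem.Dict.foldl_insert_getD_add_one_eq_counter, List.foldl_map]
  simp only [hfold, PySem.Dict.items_counter]
  rw [pvFilter_map_sum (fun w => w ≠ "" && PySem.Str.isIn w translated)
        (fun k => ((log.map pvFw).count k : Int)) (PySem.Set.ofList (log.map pvFw))]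
  exact pvSum_counts _ (PySem.Set.ofList (log.map pvFw)) (PySem.Set.nodup_ofList _)
    (log.map pvFw) (fun x hx => (PySem.Set.mem_ofList _ x).mpr hx)

-- ===== VERDICT (by name: the statement is the Claim_ definition above) =====
theorem check_entity_survival_spec : Claim_equal_check_entity_survival := by
  intro translated log _ _
  unfold Spec_check_entity_survival
  rw [pvA_eq_countP, pvB_eq_countP]
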